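-- pv_equiv track=rewrite | github.com/thkim-01/SNACO-Forest | src/aco/smiles_descriptor.py | _count_rings
-- ===== SOURCE A (Python) =====
-- def _count_rings(smiles: str) -> int:
--     """SMILES에서 고리 수를 계산한다 (ring closure 쌍 수)."""
--     count = 0
--     seen: set = set()
--     i = 0
--     n = len(smiles)
--     while i < n:
--         ch = smiles[i]
--         if ch == "[":
--             try:
--                 i = smiles.index("]", i) + 1
--             except ValueError:
--                 i += 1
--             continue
--         if ch == "%":
--             if i + 2 < n and smiles[i + 1:i + 3].isdigit():
--                 ring_num = int(smiles[i + 1:i + 3])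
--                 if ring_num in seen:
--                     count += 1
--                     seen.discard(ring_num)
--                 else:
--                     seen.add(ring_num)
--                 i += 3
--             else:
--                 i += 1
--         elif ch.isdigit():
--             ring_num = int(ch)
--             if ring_num in seen:
--                 count += 1
--                 seen.discard(ring_num)
--             else:
--                 seen.add(ring_num)
--             i += 1
--         else:
--             i += 1
--     return count
-- ===== SOURCE B (Python) =====
-- def _count_rings(smiles: str) -> int:
--     # Pass 1: collect ring-number tokens (same index logic as the scanner).
--     tokens = []
--     i = 0
--     n = len(smiles)
--     while i < n:
--         ch = smiles[i]
--         if ch == "[":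
--             try:
--                 i = smiles.index("]", i) + 1
--             except ValueError:
--                 i += 1
--             continue
--         if ch == "%":
--             if i + 2 < n and smiles[i + 1:i + 3].isdigit():
--                 tokens.append(int(smiles[i + 1:i + 3]))
--                 i += 3
--             else:
--                 i += 1
--         elif ch.isdigit():
--             tokens.append(int(ch))
--             i += 1
--         else:
--             i += 1
--     # Pass 2: frequency table, then closed-form aggregation: each pair = count // 2.
--     counts = {}
--     for t in tokens:
--         counts[t] = counts.get(t, 0) + 1
--     return sum(c // 2 for c in counts.values())
-- ===== Notes on version B (the rewrite author's own statement) =====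
-- stated objective: alternative
-- what changed: Replaces the incremental set-toggling during the scan by a two-phase collect-then-aggregate: a parsing pass gathers all ring-number tokens, then a frequency table is built and the answer is the closed-form sum of count // 2 over the table's values.
import Mathlib
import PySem

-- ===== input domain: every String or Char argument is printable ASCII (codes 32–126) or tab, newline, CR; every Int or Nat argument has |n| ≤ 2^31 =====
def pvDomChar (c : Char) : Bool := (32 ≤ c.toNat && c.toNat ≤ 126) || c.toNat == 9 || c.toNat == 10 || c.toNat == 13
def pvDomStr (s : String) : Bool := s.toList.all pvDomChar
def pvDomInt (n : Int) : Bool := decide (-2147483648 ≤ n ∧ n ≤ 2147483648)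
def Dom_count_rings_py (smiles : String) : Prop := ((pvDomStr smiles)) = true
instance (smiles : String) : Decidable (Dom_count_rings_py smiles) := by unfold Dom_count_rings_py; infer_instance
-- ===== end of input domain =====

-- B replaces A's incremental set-toggling during the scan by a collect-tokens pass plus a
-- frequency table aggregated as the sum of count // 2 (alternative decomposition, same cost).

-- int(c) for one ASCII digit char; exact here because every use is guarded by isdigit
-- (both Pythons take int of the guarded all-digit slice).
def pvDigitVal (c : Char) : Int := (c.toNat : Int) - 48

-- ===== PORT A =====
-- the while loop of A; fuel = len(smiles) suffices since i strictly increases each iteration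
def countRingsLoop (cs : List Char) (fuel i : Nat) (count : Int) (seen : PySem.Set Int) : Int :=
  match fuel with
  | 0 => count
  | f + 1 =>
    if i < cs.length then
      if cs.getD i ' ' = '[' then
        countRingsLoop cs f
          (if PySem.Chars.findFrom cs [']'] (i : Int) none = -1 then i + 1
           else (PySem.Chars.findFrom cs [']'] (i : Int) none).toNat + 1) count seen
      else if cs.getD i ' ' = '%' then
        if i + 2 < cs.length &&
            PySem.Chars.strIsdigit (PySem.List.slice cs (some ((i : Int) + 1)) (some ((i : Int) + 3))) then
          -- ring_num = int(smiles[i+1:i+3]); the slice is exactly two ASCII digits here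
          if PySem.Set.contains seen (10 * pvDigitVal (cs.getD (i + 1) ' ') + pvDigitVal (cs.getD (i + 2) ' ')) then
            countRingsLoop cs f (i + 3) (count + 1)
              (PySem.Set.discard seen (10 * pvDigitVal (cs.getD (i + 1) ' ') + pvDigitVal (cs.getD (i + 2) ' ')))
          else
            countRingsLoop cs f (i + 3) count
              (PySem.Set.add seen (10 * pvDigitVal (cs.getD (i + 1) ' ') + pvDigitVal (cs.getD (i + 2) ' ')))
        else countRingsLoop cs f (i + 1) count seen
      else if PySem.Chars.isdigit (cs.getD i ' ') then
        if PySem.Set.contains seen (pvDigitVal (cs.getD i ' ')) then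
          countRingsLoop cs f (i + 1) (count + 1) (PySem.Set.discard seen (pvDigitVal (cs.getD i ' ')))
        else
          countRingsLoop cs f (i + 1) count (PySem.Set.add seen (pvDigitVal (cs.getD i ' ')))
      else countRingsLoop cs f (i + 1) count seen
    else count

def count_rings_py (smiles : String) : Int :=
  countRingsLoop smiles.toList smiles.toList.length 0 0 PySem.Set.empty

-- ===== PORT B =====
-- pass 1 of B: collect the ring-number tokens (same index logic as Source B's first loop)
def collectTokens (cs : List Char) (fuel i : Nat) (acc : List Int) : List Int :=
  match fuel with
  | 0 => acc
  | f + 1 =>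
    if i < cs.length then
      if cs.getD i ' ' = '[' then
        collectTokens cs f
          (if PySem.Chars.findFrom cs [']'] (i : Int) none = -1 then i + 1
           else (PySem.Chars.findFrom cs [']'] (i : Int) none).toNat + 1) acc
      else if cs.getD i ' ' = '%' then
        if i + 2 < cs.length &&
            PySem.Chars.strIsdigit (PySem.List.slice cs (some ((i : Int) + 1)) (some ((i : Int) + 3))) then
          collectTokens cs f (i + 3)
            (acc ++ [10 * pvDigitVal (cs.getD (i + 1) ' ') + pvDigitVal (cs.getD (i + 2) ' ')])
        else collectTokens cs f (i + 1) acc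
      else if PySem.Chars.isdigit (cs.getD i ' ') then
        collectTokens cs f (i + 1) (acc ++ [pvDigitVal (cs.getD i ' ')])
      else collectTokens cs f (i + 1) acc
    else acc

-- pass 2 of Source B: counts[t] = counts.get(t, 0) + 1 over the tokens,
-- then sum(c // 2 for c in counts.values())
def count_rings_py_alt (smiles : String) : Int :=
  ((PySem.Dict.values
      ((collectTokens smiles.toList smiles.toList.length 0 []).foldl
        (fun d t => d.insert t (d.getD t 0 + 1)) PySem.Dict.empty)).map
    (fun c => PySem.Int.floordiv c 2)).sum

-- ===== PRECONDITION & SPEC =====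
def Spec_count_rings_py (smiles : String) (out : Int) : Prop := out = count_rings_py_alt smiles
instance (smiles : String) (out : Int) : Decidable (Spec_count_rings_py smiles out) := by unfold Spec_count_rings_py; infer_instance

-- ===== CLAIM (what is proved, stated in full; the proofs are below) =====
def Claim_equal_count_rings_py : Prop := ∀ (smiles : String), Dom_count_rings_py smiles → Spec_count_rings_py smiles (count_rings_py smiles)

-- ===== LEMMAS AND PROOFS =====

-- A's toggle fold over a token list (proof-side characterisation of A's loop)
def tallyToggle : List Int → PySem.Set Int → Int
  | [], _ => 0
  | t :: ts, s =>
    if PySem.Set.contains s t then 1 + tallyToggle ts (PySem.Set.discard s t)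
    else tallyToggle ts (PySem.Set.add s t)

theorem collectTokens_acc (cs : List Char) :
    ∀ (fuel i : Nat) (acc : List Int),
      collectTokens cs fuel i acc = acc ++ collectTokens cs fuel i [] := by
  intro fuel
  induction fuel with
  | zero => intro i acc; simp [collectTokens]
  | succ f ih =>
    intro i acc
    simp only [collectTokens]
    split_ifs
    all_goals
      first
        | exact ih _ _
        | ((conv_lhs => rw [ih]); (conv_rhs => rw [ih]); simp)
        | simp

theorem countRingsLoop_eq_tally (cs : List Char) :
    ∀ (fuel i : Nat) (count : Int) (seen : PySem.Set Int),
      countRingsLoop cs fuel i count seen =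
        count + tallyToggle (collectTokens cs fuel i []) seen := by
  intro fuel
  induction fuel with
  | zero => intro i count seen; simp [countRingsLoop, collectTokens, tallyToggle]
  | succ f ih =>
    intro i count seen
    simp only [countRingsLoop, collectTokens]
    split_ifs
    · exact ih _ _ _
    · exact ih _ _ _
    · (conv_rhs => rw [collectTokens_acc cs f])
      rw [ih]
      try simp only [List.getD] at *
      simp only [List.nil_append, List.singleton_append, tallyToggle]
      rw [if_pos (by assumption : _ = true)]
      omega
    · (conv_rhs => rw [collectTokens_acc cs f])
      rw [ih]
      try simp only [List.getD] at *
      simp only [List.nil_append, List.singleton_append, tallyToggle]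
      rw [if_neg (by assumption)]
    · exact ih _ _ _
    · (conv_rhs => rw [collectTokens_acc cs f])
      rw [ih]
      try simp only [List.getD] at *
      simp only [List.nil_append, List.singleton_append, tallyToggle]
      rw [if_pos (by assumption : _ = true)]
      omega
    · (conv_rhs => rw [collectTokens_acc cs f])
      rw [ih]
      try simp only [List.getD] at *
      simp only [List.nil_append, List.singleton_append, tallyToggle]
      rw [if_neg (by assumption)]
    · exact ih _ _ _
    · simp [tallyToggle]

theorem toFinset_discard (s : PySem.Set Int) (t : Int) :
    (PySem.Set.discard s t).toFinset = s.toFinset.erase t := by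
  ext k
  simp [PySem.Set.mem_discard, Finset.mem_erase, and_comm]

theorem tally_eq_sum (l : List Int) :
    ∀ (s : PySem.Set Int), s.Nodup →
      tallyToggle l s =
        ∑ k ∈ (s.toFinset ∪ l.toFinset),
          ((l.count k : Int) + (if k ∈ s then 1 else 0)) / 2 := by
  induction l with
  | nil =>
    intro s hs
    simp only [tallyToggle, List.toFinset_nil, Finset.union_empty, List.count_nil]
    refine (Finset.sum_eq_zero ?_).symm
    intro k hk
    rw [List.mem_toFinset] at hk
    simp [hk]
  | cons t ts ih =>
    intro s hs
    by_cases hm : t ∈ s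
    · have hcont : PySem.Set.contains s t = true := (PySem.Set.contains_iff s t).mpr hm
      have hK : s.toFinset ∪ (t :: ts).toFinset = s.toFinset ∪ ts.toFinset := by
        ext k
        simp only [List.toFinset_cons, Finset.mem_union, Finset.mem_insert, List.mem_toFinset]
        constructor
        · rintro (h | h | h) <;> simp_all
        · tauto
      have hmem : t ∈ s.toFinset ∪ ts.toFinset := by simp [List.mem_toFinset, hm]
      simp only [tallyToggle, hcont, if_true]
      rw [ih _ (PySem.Set.nodup_discard s t hs), toFinset_discard, hK]
      have hins : insert t ((s.toFinset.erase t) ∪ ts.toFinset) = s.toFinset ∪ ts.toFinset := by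
        ext k
        simp only [Finset.mem_insert, Finset.mem_union, Finset.mem_erase, List.mem_toFinset]
        constructor
        · rintro (h | ⟨_, h⟩ | h)
          · exact Or.inl (h ▸ hm)
          · exact Or.inl h
          · exact Or.inr h
        · rintro (h | h)
          · by_cases hkt : k = t
            · exact Or.inl hkt
            · exact Or.inr (Or.inl ⟨hkt, h⟩)
          · exact Or.inr (Or.inr h)
      have h1 :
          (∑ k ∈ (s.toFinset.erase t) ∪ ts.toFinset,
            ((ts.count k : Int) + (if k ∈ PySem.Set.discard s t then 1 else 0)) / 2) =
          ∑ k ∈ s.toFinset ∪ ts.toFinset,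
            ((ts.count k : Int) + (if k ∈ PySem.Set.discard s t then 1 else 0)) / 2 := by
        rw [← hins]
        by_cases htK : t ∈ (s.toFinset.erase t) ∪ ts.toFinset
        · rw [Finset.insert_eq_self.mpr htK]
        · rw [Finset.sum_insert htK]
          have hzero :
              ((ts.count t : Int) + (if t ∈ PySem.Set.discard s t then 1 else 0)) / 2 = 0 := by
            have hnotts : t ∉ ts := by
              intro h; exact htK (Finset.mem_union_right _ (List.mem_toFinset.mpr h))
            simp [PySem.Set.mem_discard, List.count_eq_zero_of_not_mem hnotts]
          rw [hzero, zero_add]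
      rw [h1]
      have hdiff :
          (∑ k ∈ s.toFinset ∪ ts.toFinset,
              (((t :: ts).count k : Int) + (if k ∈ s then 1 else 0)) / 2) -
          (∑ k ∈ s.toFinset ∪ ts.toFinset,
              ((ts.count k : Int) + (if k ∈ PySem.Set.discard s t then 1 else 0)) / 2) = 1 := by
        rw [← Finset.sum_sub_distrib]
        have hterm : ∀ k ∈ s.toFinset ∪ ts.toFinset,
            (((t :: ts).count k : Int) + (if k ∈ s then 1 else 0)) / 2 -
              ((ts.count k : Int) + (if k ∈ PySem.Set.discard s t then 1 else 0)) / 2 =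
            if k = t then (1 : Int) else 0 := by
          intro k _
          by_cases hkt : k = t
          · subst hkt
            simp only [List.count_cons_self, PySem.Set.mem_discard, hm, if_pos, and_false,
              ne_eq, not_true_eq_false, if_false]
            push_cast
            omega
          · have hkt' : ¬ t = k := fun h => hkt h.symm
            simp [PySem.Set.mem_discard, hkt, hkt']
        rw [Finset.sum_congr rfl hterm, Finset.sum_ite_eq' _ t (fun _ => (1 : Int)), if_pos hmem]
      omega
    · have hcont : PySem.Set.contains s t = false := by
        rw [← Bool.not_eq_true, PySem.Set.contains_iff]; exact hm
      simp only [tallyToggle, hcont, Bool.false_eq_true, if_false]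
      rw [ih _ (PySem.Set.nodup_add s t hs)]
      have hK : (PySem.Set.add s t).toFinset ∪ ts.toFinset =
          s.toFinset ∪ (t :: ts).toFinset := by
        ext k
        simp only [Finset.mem_union, List.mem_toFinset, PySem.Set.mem_add,
          List.toFinset_cons, Finset.mem_insert]
        tauto
      rw [hK]
      refine Finset.sum_congr rfl (fun k _ => ?_)
      by_cases hkt : k = t
      · subst hkt
        simp [hm, List.count_cons_self]
      · have hkt' : ¬ t = k := fun h => hkt h.symm
        simp [PySem.Set.mem_add, hkt, hkt']

theorem toFinset_ofList (l : List Int) : (PySem.Set.ofList l).toFinset = l.toFinset := by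
  ext k
  simp [PySem.Set.mem_ofList]

-- ===== VERDICT (by name: the statement is the Claim_ definition above) =====
theorem count_rings_py_spec : Claim_equal_count_rings_py := by
  intro smiles _
  unfold Spec_count_rings_py count_rings_py count_rings_py_alt
  rw [countRingsLoop_eq_tally, PySem.Dict.foldl_insert_getD_add_one_eq_counter]
  set toks := collectTokens smiles.toList smiles.toList.length 0 [] with htoks
  rw [tally_eq_sum toks PySem.Set.empty List.nodup_nil]
  have hvals : PySem.Dict.values (PySem.Dict.counter toks) =
      (PySem.Set.ofList toks : List Int).map (fun k => (toks.count k : Int)) := by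
    simp only [PySem.Dict.values, PySem.Dict.items_counter, List.map_map]
    rfl
  rw [hvals, List.map_map]
  rw [← List.sum_toFinset _ (PySem.Set.nodup_ofList toks), toFinset_ofList]
  have hempty : (PySem.Set.empty : PySem.Set Int).toFinset = ∅ := rfl
  rw [hempty, Finset.empty_union, zero_add]
  refine Finset.sum_congr rfl (fun k hk => ?_)
  simp only [Function.comp_apply,
    PySem.Int.floordiv_eq_ediv_of_pos (a := (toks.count k : Int)) (by norm_num : (0:Int) < 2)]
  simp [PySem.Set.empty]
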